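-- pv_equiv track=rewrite | github.com/yewsg/yews | src/yews/cpic/integration.py | find_runs_with_gaps
-- ===== SOURCE A (Python) =====
-- def find_runs_with_gaps(results_dict, max_gap):
--     '''
--     Find runs within results_dict from detect function where either the
--     detection probability for p or s is above the probability threshold,
--     allowing for max_gap 0's in between detected windows.
--
--     Inputs:
--         results_dict: dictionary of results from yews detect function
--         max_gap: max number of consecutive 0's allowable within runs
--
--     Output:
--         run_indices: list of pairs describing start and end of run windows
--     '''
--     scan_for_start = True
--     zero_count = 0
--     run_indices = []
--     for i in range(len(results_dict['detect_p'])):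
--         if scan_for_start:
--             if results_dict['detect_p'][i] or results_dict['detect_s'][i]:
--                 start_index = i
--                 most_recent_nonzero = i
--                 scan_for_start = False
--         else:
--             if results_dict['detect_p'][i] or results_dict['detect_s'][i]:
--                 most_recent_nonzero = i
--                 zero_count = 0
--             else:
--                 if zero_count == max_gap:
--                     run_indices.append([start_index, most_recent_nonzero])
--                     zero_count = 0
--                     scan_for_start = True
--                 else:
--                     zero_count += 1
--     return run_indices
-- ===== SOURCE B (Python) =====
-- def find_runs_with_gaps(results_dict, max_gap):
--     detect_p = results_dict['detect_p']
--     hits = [i for i in range(len(detect_p))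
--             if detect_p[i] or results_dict['detect_s'][i]]
--     if not hits:
--         return []
--     run_indices = []
--     start = prev = hits[0]
--     for h in hits[1:]:
--         if h - prev - 1 > max_gap:
--             run_indices.append([start, prev])
--             start = h
--         prev = h
--     if len(detect_p) - prev - 1 > max_gap:
--         run_indices.append([start, prev])
--     return run_indices
-- ===== Notes on version B (the rewrite author's own statement) =====
-- stated objective: alternative
-- what changed: Replaces A's index-by-index state machine (scan flag, zero counter, most-recent-nonzero) with a two-phase decomposition: collect the hit positions once, then split between consecutive hits whose gap exceeds max_gap, keeping the final run only when enough trailing zeros close it; Pre_ also excludes negative max_gap, which is outside the function's natural domain (a max count of allowable zeros cannot be negative).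
-- outside the precondition, e.g. on find_runs_with_gaps({'detect_p': [True], 'detect_s': [False]}, -1): A returns [], B returns [[0, 0]]
import Mathlib
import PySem

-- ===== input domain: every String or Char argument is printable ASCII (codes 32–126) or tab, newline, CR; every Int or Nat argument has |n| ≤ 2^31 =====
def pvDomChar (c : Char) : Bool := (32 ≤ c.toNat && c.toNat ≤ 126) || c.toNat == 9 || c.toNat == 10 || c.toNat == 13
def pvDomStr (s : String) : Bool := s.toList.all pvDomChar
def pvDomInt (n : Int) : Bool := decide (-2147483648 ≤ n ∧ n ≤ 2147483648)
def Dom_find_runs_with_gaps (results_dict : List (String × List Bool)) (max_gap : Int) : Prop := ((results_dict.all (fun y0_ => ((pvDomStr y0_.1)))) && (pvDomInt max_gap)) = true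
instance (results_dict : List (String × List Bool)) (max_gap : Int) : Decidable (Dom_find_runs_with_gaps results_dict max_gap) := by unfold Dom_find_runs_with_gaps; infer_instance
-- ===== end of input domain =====

-- B re-implements the scan as: collect hit indices once, then split between consecutive
-- hits whose gap exceeds max_gap (no state machine); same values everywhere on Pre_.

-- ===== PORT A =====
-- `dp[i] or ds[i]` of the Python loop body (both ports read the arrays the same way;
-- out-of-range/missing-key cases are excluded by Pre_, the port defaults there).
def pvHit (dp ds : List Bool) (i : Nat) : Bool := dp.getD i false || ds.getD i false

-- one iteration of A's for-loop; state = (scan_for_start, zero_count, run_indices, start_index, most_recent_nonzero)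
def pvAStep (dp ds : List Bool) (mg : Int)
    (s : Bool × Int × List (List Int) × Int × Int) (i : Nat) :
    Bool × Int × List (List Int) × Int × Int :=
  match s with
  | (scan, zc, runs, si, mrn) =>
    if scan then
      if pvHit dp ds i then (false, zc, runs, (i : Int), (i : Int)) else (scan, zc, runs, si, mrn)
    else
      if pvHit dp ds i then (false, 0, runs, si, (i : Int))
      else if zc = mg then (true, 0, runs ++ [[si, mrn]], si, mrn)
      else (false, zc + 1, runs, si, mrn)

def find_runs_with_gaps (results_dict : List (String × List Bool)) (max_gap : Int) : List (List Int) :=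
  let dp := ((PySem.Dict.mk results_dict).get? "detect_p").getD []
  let ds := ((PySem.Dict.mk results_dict).get? "detect_s").getD []
  ((List.range dp.length).foldl (pvAStep dp ds max_gap) (true, 0, [], 0, 0)).2.2.1

-- ===== PORT B =====
-- B: `hits = [i for i in range(len(detect_p)) if detect_p[i] or detect_s[i]]`
def pvHits (dp ds : List Bool) (n : Nat) : List Int :=
  ((List.range n).filter (fun i => pvHit dp ds i)).map (fun (i : Nat) => (i : Int))

-- B's for-loop over hits[1:]; returns (run_indices, start, prev)
def pvBLoop (mg : Int) (runs : List (List Int)) (start prev : Int) (hs : List Int) :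
    List (List Int) × Int × Int :=
  match hs with
  | [] => (runs, start, prev)
  | h :: t =>
    if h - prev - 1 > mg then pvBLoop mg (runs ++ [[start, prev]]) h h t
    else pvBLoop mg runs start h t

def find_runs_with_gaps_alt (results_dict : List (String × List Bool)) (max_gap : Int) : List (List Int) :=
  let dp := (((PySem.Dict.mk results_dict).get? "detect_p")).getD []
  let ds := (((PySem.Dict.mk results_dict).get? "detect_s")).getD []
  match pvHits dp ds dp.length with
  | [] => []
  | h0 :: rest =>
    let t := pvBLoop max_gap [] h0 h0 rest
    if (dp.length : Int) - t.2.2 - 1 > max_gap then t.1 ++ [[t.2.1, t.2.2]] else t.1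

-- ===== PRECONDITION & SPEC =====
-- Pre_ excludes (a) the inputs where the Python raises: a missing 'detect_p' key, or a position
-- with detect_p[i] false where 'detect_s' is missing (KeyError) or too short (IndexError); and
-- (b) negative max_gap, which is outside the function's natural domain: a "max number of
-- consecutive 0's allowable within runs" cannot be negative.
def Pre_find_runs_with_gaps (results_dict : List (String × List Bool)) (max_gap : Int) : Prop :=
  0 ≤ max_gap ∧
  ((PySem.Dict.mk results_dict).get? "detect_p").isSome ∧
  ∀ i < (((PySem.Dict.mk results_dict).get? "detect_p").getD []).length,
    (((PySem.Dict.mk results_dict).get? "detect_p").getD []).getD i false = true ∨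
    (((PySem.Dict.mk results_dict).get? "detect_s").isSome ∧
      i < (((PySem.Dict.mk results_dict).get? "detect_s").getD []).length)
instance (results_dict : List (String × List Bool)) (max_gap : Int) : Decidable (Pre_find_runs_with_gaps results_dict max_gap) := by unfold Pre_find_runs_with_gaps; infer_instance

def pvWitness_find_runs_with_gaps : (List (String × List Bool)) × Int :=
  ([("detect_p", [true, false, true]), ("detect_s", [false, false, false])], 0)

def Spec_find_runs_with_gaps (results_dict : List (String × List Bool)) (max_gap : Int) (out : List (List Int)) : Prop := out = find_runs_with_gaps_alt results_dict max_gap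
instance (results_dict : List (String × List Bool)) (max_gap : Int) (out : List (List Int)) : Decidable (Spec_find_runs_with_gaps results_dict max_gap out) := by unfold Spec_find_runs_with_gaps; infer_instance

-- ===== CLAIM (what is proved, stated in full; the proofs are below) =====
def Claim_equal_find_runs_with_gaps : Prop := ∀ (results_dict : List (String × List Bool)) (max_gap : Int), Dom_find_runs_with_gaps results_dict max_gap → Pre_find_runs_with_gaps results_dict max_gap → Spec_find_runs_with_gaps results_dict max_gap (find_runs_with_gaps results_dict max_gap)

-- ===== LEMMAS AND PROOFS =====

-- A's state after scanning indices 0..n-1, expressed through B's decomposition.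
def pvState (dp ds : List Bool) (mg : Int) (n : Nat) : Bool × Int × List (List Int) × Int × Int :=
  match pvHits dp ds n with
  | [] => (true, 0, [], 0, 0)
  | h0 :: rest =>
    let t := pvBLoop mg [] h0 h0 rest
    if (n : Int) - t.2.2 - 1 > mg then (true, 0, t.1 ++ [[t.2.1, t.2.2]], t.2.1, t.2.2)
    else (false, (n : Int) - t.2.2 - 1, t.1, t.2.1, t.2.2)

lemma pvHits_succ (dp ds : List Bool) (n : Nat) :
    pvHits dp ds (n + 1) = pvHits dp ds n ++ (if pvHit dp ds n then [(n : Int)] else []) := by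
  unfold pvHits
  rw [List.range_succ, List.filter_append, List.map_append]
  by_cases h : pvHit dp ds n <;> simp [h]

lemma pvHits_lt (dp ds : List Bool) (n : Nat) : ∀ x ∈ pvHits dp ds n, x < (n : Int) := by
  intro x hx
  unfold pvHits at hx
  obtain ⟨i, hi, rfl⟩ := List.mem_map.mp hx
  exact_mod_cast List.mem_range.mp (List.mem_filter.mp hi).1

lemma pvBLoop_snoc (mg : Int) (h : Int) : ∀ (hs : List Int) (runs : List (List Int)) (s p : Int),
    pvBLoop mg runs s p (hs ++ [h]) =
      (if h - (pvBLoop mg runs s p hs).2.2 - 1 > mg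
       then ((pvBLoop mg runs s p hs).1 ++ [[(pvBLoop mg runs s p hs).2.1, (pvBLoop mg runs s p hs).2.2]], h, h)
       else ((pvBLoop mg runs s p hs).1, (pvBLoop mg runs s p hs).2.1, h)) := by
  intro hs
  induction hs with
  | nil => intro runs s p; simp [pvBLoop]
  | cons x t ih =>
    intro runs s p
    by_cases hx : x - p - 1 > mg
    · simp only [List.cons_append, pvBLoop, if_pos hx]; exact ih _ _ _
    · simp only [List.cons_append, pvBLoop, if_neg hx]; exact ih _ _ _

lemma pvBLoop_prev_lt (mg : Int) (n : Int) : ∀ (hs : List Int) (runs : List (List Int)) (s p : Int),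
    p < n → (∀ x ∈ hs, x < n) → (pvBLoop mg runs s p hs).2.2 < n := by
  intro hs
  induction hs with
  | nil => intro runs s p hp _; simpa [pvBLoop] using hp
  | cons x t ih =>
    intro runs s p hp hmem
    simp only [pvBLoop]
    split_ifs with hx
    · exact ih _ _ _ (hmem x (by simp)) (fun y hy => hmem y (by simp [hy]))
    · exact ih _ _ _ (hmem x (by simp)) (fun y hy => hmem y (by simp [hy]))

lemma pvState_prev_lt (dp ds : List Bool) (mg : Int) (n : Nat) (h0 : Int) (rest : List Int)
    (hh : pvHits dp ds n = h0 :: rest) :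
    (pvBLoop mg [] h0 h0 rest).2.2 < (n : Int) := by
  have hmem : ∀ x ∈ h0 :: rest, x < (n : Int) := by
    intro x hx; exact pvHits_lt dp ds n x (hh ▸ hx)
  exact pvBLoop_prev_lt mg n rest [] h0 h0 (hmem h0 (by simp)) (fun y hy => hmem y (by simp [hy]))

lemma foldl_eq_pvState (dp ds : List Bool) (mg : Int) (hmg : 0 ≤ mg) (n : Nat) :
    (List.range n).foldl (pvAStep dp ds mg) (true, 0, [], 0, 0) = pvState dp ds mg n := by
  induction n with
  | zero => simp [pvState, pvHits]
  | succ n ih =>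
    rw [List.range_succ, List.foldl_append, ih]
    simp only [List.foldl_cons, List.foldl_nil]
    by_cases hn : pvHit dp ds n
    · have hsucc : pvHits dp ds (n + 1) = pvHits dp ds n ++ [(n : Int)] := by
        rw [pvHits_succ]; simp [hn]
      rcases hhits : pvHits dp ds n with _ | ⟨h0, rest⟩
      · -- no previous hits: this hit opens the first run
        rw [hhits] at hsucc
        simp only [pvState, hhits, hsucc, List.nil_append]
        simp only [pvAStep, hn, if_pos, pvBLoop]
        have hnc : ¬ (((n : Nat) + 1 : Int) - (n : Int) - 1 > mg) := by omega
        push_cast at hnc ⊢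
        simp [Prod.ext_iff]
        omega
      · rw [hhits] at hsucc
        have hprev := pvState_prev_lt dp ds mg n h0 rest hhits
        simp only [pvState, hhits, hsucc, List.cons_append]
        rw [pvBLoop_snoc]
        set t := pvBLoop mg [] h0 h0 rest with ht
        have hnc : ¬ (((n + 1 : Nat) : Int) - (n : Int) - 1 > mg) := by push_cast; omega
        by_cases hc : (n : Int) - t.2.2 - 1 > mg
        · -- previous run already closed: scan mode, new hit opens a run
          simp only [if_pos hc, pvAStep, hn, if_true]
          simp only [if_neg hnc]
          simp
        · -- run open: hit extends it
          simp only [if_neg hc, pvAStep, hn, if_true]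
          simp only [if_neg hnc]
          simp
    · have hsucc : pvHits dp ds (n + 1) = pvHits dp ds n := by
        rw [pvHits_succ]; simp [hn]
      rcases hhits : pvHits dp ds n with _ | ⟨h0, rest⟩
      · rw [hhits] at hsucc
        simp only [pvState, hhits, hsucc]
        simp [pvAStep, hn]
      · rw [hhits] at hsucc
        have hprev := pvState_prev_lt dp ds mg n h0 rest hhits
        simp only [pvState, hhits, hsucc]
        set t := pvBLoop mg [] h0 h0 rest with ht
        by_cases hc : (n : Int) - t.2.2 - 1 > mg
        · -- already closed: zero ignored in scan mode
          have hc' : ((n + 1 : Nat) : Int) - t.2.2 - 1 > mg := by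
            push_cast; push_cast at hc; omega
          simp only [if_pos hc, if_pos hc', pvAStep, hn]
          simp
        · -- run open: one more zero
          simp only [if_neg hc, pvAStep, hn]
          by_cases hz : (n : Int) - t.2.2 - 1 = mg
          · -- this zero is the (max_gap+1)th: close the run
            have hc' : ((n + 1 : Nat) : Int) - t.2.2 - 1 > mg := by push_cast; omega
            simp only [if_pos hz, if_pos hc']
            simp
          · have hc' : ¬ (((n + 1 : Nat) : Int) - t.2.2 - 1 > mg) := by
              push_cast; push_cast at hc; omega
            simp only [if_neg hz, if_neg hc']
            simp [Prod.ext_iff]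
            omega

-- ===== VERDICT (by name: the statement is the Claim_ definition above) =====
theorem find_runs_with_gaps_spec : Claim_equal_find_runs_with_gaps := by
  intro results_dict max_gap _ hpre
  show find_runs_with_gaps results_dict max_gap = find_runs_with_gaps_alt results_dict max_gap
  simp only [find_runs_with_gaps, find_runs_with_gaps_alt]
  rw [foldl_eq_pvState _ _ _ hpre.1]
  unfold pvState
  rcases hhits : pvHits (((PySem.Dict.mk results_dict).get? "detect_p").getD [])
      (((PySem.Dict.mk results_dict).get? "detect_s").getD [])
      (((PySem.Dict.mk results_dict).get? "detect_p").getD []).length with _ | ⟨h0, rest⟩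
  · rfl
  · by_cases hc : ((((PySem.Dict.mk results_dict).get? "detect_p").getD []).length : Int)
          - (pvBLoop max_gap [] h0 h0 rest).2.2 - 1 > max_gap
    · simp only [if_pos hc]
    · simp only [if_neg hc]
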